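-- pv_equiv track=rewrite | github.com/Yazawazi/renaissance_dumper | srp_pack.py | build_byte_cache
-- ===== SOURCE A (Python) =====
-- def build_byte_cache(nodes: dict) -> dict[int, set[int]]:
--     cache = {}
--
--     def collect_bytes(node_id: int) -> set[int]:
--         if node_id in cache:
--             return cache[node_id]
--
--         if node_id < 256:
--             result = {node_id}
--         else:
--             left, right = nodes[node_id]
--             result = collect_bytes(left) | collect_bytes(right)
--
--         cache[node_id] = result
--         return result
--
--     for node_id in nodes:
--         collect_bytes(node_id)
--
--     return cache
-- ===== SOURCE B (Python) =====
-- def build_byte_cache(nodes: dict) -> dict[int, set[int]]: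
--     # Explicit-stack two-phase post-order traversal instead of recursion.
--     cache = {}
--     for root in nodes:
--         stack = [(root, False)]
--         while stack:
--             nid, ready = stack.pop()
--             if ready:
--                 left, right = nodes[nid]
--                 cache[nid] = cache[left] | cache[right]
--             elif nid in cache:
--                 continue
--             elif nid < 256:
--                 cache[nid] = {nid}
--             else:
--                 left, right = nodes[nid]
--                 stack.append((nid, True))
--                 stack.append((right, False))
--                 stack.append((left, False))
--     return cache
-- ===== Notes on version B (the rewrite author's own statement) =====
-- stated objective: alternative
-- what changed: Replaces the memoized recursive DFS with an explicit-stack iterative post-order traversal (two-phase stack entries: first encounter pushes the marked node and its children, second encounter unions the children's cached sets), keeping the same cache dict and insertion order.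
import Mathlib
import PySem

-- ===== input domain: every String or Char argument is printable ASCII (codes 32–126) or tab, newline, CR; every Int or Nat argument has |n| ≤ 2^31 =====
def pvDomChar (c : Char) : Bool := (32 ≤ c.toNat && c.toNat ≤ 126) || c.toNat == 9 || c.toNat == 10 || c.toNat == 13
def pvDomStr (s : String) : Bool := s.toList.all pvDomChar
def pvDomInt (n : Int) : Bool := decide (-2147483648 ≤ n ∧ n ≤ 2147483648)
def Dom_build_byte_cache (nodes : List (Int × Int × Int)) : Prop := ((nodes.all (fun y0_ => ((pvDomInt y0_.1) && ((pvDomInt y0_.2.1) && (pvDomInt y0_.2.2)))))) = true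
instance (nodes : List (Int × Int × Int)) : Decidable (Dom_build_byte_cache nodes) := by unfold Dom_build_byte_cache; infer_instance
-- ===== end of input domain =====

-- B replaces A's memoized recursive DFS by an explicit-stack two-phase post-order
-- traversal (objective: alternative decomposition; same values and insertion order).

-- ===== PORT A =====
-- collect_bytes, transliterated; fuel is the standard totality device
-- (fuel = nodes.length + 1 bounds the recursion depth on every input Pre_ admits);
-- the `find? = none` branch is Python's KeyError, excluded by Pre_.
def collectA (nodes : List (Int × Int × Int)) :
    Nat → Int → PySem.Dict Int (List Int) → List Int × PySem.Dict Int (List Int)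
  | 0, _, cache => ([], cache)                      -- fuel exhausted (unreachable under Pre_)
  | fuel + 1, id, cache =>
    match cache.get? id with
    | some r => (r, cache)                          -- if node_id in cache: return cache[node_id]
    | none =>
      if id < 256 then
        ([id], cache.insert id [id])                -- result = {node_id}; cache it
      else
        match nodes.find? (fun u => u.1 == id) with
        | none => ([], cache)                       -- KeyError (outside Pre_)
        | some t =>
          let p1 := collectA nodes fuel t.2.1 cache
          let p2 := collectA nodes fuel t.2.2 p1.2
          let result := PySem.Set.union p1.1 p2.1   -- collect_bytes(left) | collect_bytes(right)
          (result, p2.2.insert id result)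

def build_byte_cache (nodes : List (Int × Int × Int)) : List (Int × List Int) :=
  (nodes.foldl (fun cache t => (collectA nodes (nodes.length + 1) t.1 cache).2)
    PySem.Dict.empty).items

-- ===== PORT B =====
-- Source B's while loop over the explicit stack; fuel is the totality device
-- (2^(nodes.length+3) pops suffice on every input Pre_ admits); the `find? = none`
-- branches are Python's KeyError, excluded by Pre_.
def runB (nodes : List (Int × Int × Int)) :
    Nat → List (Int × Bool) → PySem.Dict Int (List Int) → PySem.Dict Int (List Int)
  | _, [], cache => cache                           -- while stack: loop ends
  | 0, _ :: _, cache => cache                       -- fuel exhausted (unreachable under Pre_)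
  | f + 1, (nid, true) :: st, cache =>              -- second phase: children are cached
    match nodes.find? (fun u => u.1 == nid) with
    | none => cache                                 -- KeyError (outside Pre_)
    | some t =>
      runB nodes f st
        (cache.insert nid (PySem.Set.union (cache.getD t.2.1 []) (cache.getD t.2.2 [])))
  | f + 1, (nid, false) :: st, cache =>             -- first encounter
    if (cache.get? nid).isSome then runB nodes f st cache      -- elif nid in cache: continue
    else if nid < 256 then runB nodes f st (cache.insert nid [nid])
    else
      match nodes.find? (fun u => u.1 == nid) with
      | none => cache                               -- KeyError (outside Pre_)
      | some t =>
        runB nodes f ((t.2.1, false) :: (t.2.2, false) :: (nid, true) :: st) cache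

def build_byte_cache_alt (nodes : List (Int × Int × Int)) : List (Int × List Int) :=
  (nodes.foldl
    (fun cache t => runB nodes (2 ^ (nodes.length + 3)) [(t.1, false)] cache)
    PySem.Dict.empty).items

-- ===== PRECONDITION & SPEC =====
-- Pre_ excludes exactly the inputs on which the Python A raises: a reachable internal
-- node id that is not a key (KeyError) or a cyclically reachable internal node
-- (RecursionError).  It is stated as bounded unfolding of the child relation of the
-- input graph: depth nodes.length + 1 always suffices for an acyclic, fully-present
-- table, so Pre_ holds iff A returns.
def depthOk (nodes : List (Int × Int × Int)) : Nat → Int → Bool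
  | 0, _ => false
  | d + 1, id =>
    if id < 256 then true
    else
      match nodes.find? (fun u => u.1 == id) with
      | none => false
      | some t => depthOk nodes d t.2.1 && depthOk nodes d t.2.2

def Pre_build_byte_cache (nodes : List (Int × Int × Int)) : Prop :=
  ∀ t ∈ nodes, depthOk nodes (nodes.length + 1) t.1 = true
instance (nodes : List (Int × Int × Int)) : Decidable (Pre_build_byte_cache nodes) := by
  unfold Pre_build_byte_cache; infer_instance

def pvWitness_build_byte_cache : (List (Int × Int × Int)) :=
  [(257, 256, 10), (65, 0, 0), (256, 65, 66)]

def Spec_build_byte_cache (nodes : List (Int × Int × Int)) (out : List (Int × List Int)) : Prop := out = build_byte_cache_alt nodes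
instance (nodes : List (Int × Int × Int)) (out : List (Int × List Int)) : Decidable (Spec_build_byte_cache nodes out) := by unfold Spec_build_byte_cache; infer_instance

-- ===== CLAIM (what is proved, stated in full; the proofs are below) =====
def Claim_equal_build_byte_cache : Prop := ∀ (nodes : List (Int × Int × Int)), Dom_build_byte_cache nodes → Pre_build_byte_cache nodes → Spec_build_byte_cache nodes (build_byte_cache nodes)

-- ===== LEMMAS AND PROOFS =====

-- collectA never removes or changes an existing cache entry
lemma collectA_pres (nodes : List (Int × Int × Int)) :
    ∀ (f : Nat) (id : Int) (c : PySem.Dict Int (List Int)) (k : Int) (v : List Int),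
      c.get? k = some v → ((collectA nodes f id c).2).get? k = some v := by
  intro f
  induction f with
  | zero => intro id c k v h; exact h
  | succ f ih =>
    intro id c k v h
    simp only [collectA]
    rcases h0 : c.get? id with _ | r
    · have hk : k ≠ id := by intro e; rw [e, h0] at h; cases h
      by_cases hid : id < 256
      · simp [hid, PySem.Dict.get?_insert, hk, h]
      · rcases hf : nodes.find? (fun u => u.1 == id) with _ | t
        · simpa [hid, hf] using h
        · have h1 := ih t.2.1 c k v h
          have h2 := ih t.2.2 (collectA nodes f t.2.1 c).2 k v h1
          simp [hid, hf, PySem.Dict.get?_insert, hk, h2]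
    · simpa [h0] using h

-- after collectA, the visited node is cached with the returned set
lemma collectA_caches (nodes : List (Int × Int × Int)) :
    ∀ (d : Nat) (id : Int) (c : PySem.Dict Int (List Int)),
      depthOk nodes d id = true →
      ((collectA nodes d id c).2).get? id = some (collectA nodes d id c).1 := by
  intro d
  induction d with
  | zero => intro id c h; simp [depthOk] at h
  | succ d _ =>
    intro id c h
    simp only [collectA]
    rcases h0 : c.get? id with _ | r
    · by_cases hid : id < 256
      · simp [hid, PySem.Dict.get?_insert_self]
      · rcases hf : nodes.find? (fun u => u.1 == id) with _ | t
        · simp [depthOk, hid, hf] at h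
        · simp [hid, hf, PySem.Dict.get?_insert_self]
    · simp [h0]

-- the simulation: processing (id, false) on top of the stack runs exactly
-- collect_bytes(id), with a per-node pop count k bounded by 2^(d+2) - 2
lemma simB (nodes : List (Int × Int × Int)) :
    ∀ (d : Nat) (id : Int) (c : PySem.Dict Int (List Int)),
      depthOk nodes d id = true →
      ∃ k : Nat, k + 2 ≤ 2 ^ (d + 2) ∧
        ∀ (f : Nat) (st : List (Int × Bool)),
          runB nodes (k + f) ((id, false) :: st) c =
            runB nodes f st (collectA nodes d id c).2 := by
  intro d
  induction d with
  | zero => intro id c h; simp [depthOk] at h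
  | succ d ih =>
    intro id c h
    have hpow : (8 : Nat) ≤ 2 ^ (d + 1 + 2) := by
      calc (8 : Nat) = 2 ^ 3 := by norm_num
      _ ≤ 2 ^ (d + 1 + 2) := Nat.pow_le_pow_right (by norm_num) (by omega)
    rcases h0 : c.get? id with _ | r
    · by_cases hid : id < 256
      · -- leaf: one pop
        refine ⟨1, by omega, fun f st => ?_⟩
        have h1f : (1 : Nat) + f = f + 1 := by omega
        rw [h1f]
        simp [runB, collectA, h0, hid]
      · rcases hf : nodes.find? (fun u => u.1 == id) with _ | t
        · simp [depthOk, hid, hf] at h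
        · have hch : depthOk nodes d t.2.1 = true ∧ depthOk nodes d t.2.2 = true := by
            simpa [depthOk, hid, hf] using h
          obtain ⟨k1, hk1, e1⟩ := ih t.2.1 c hch.1
          obtain ⟨k2, hk2, e2⟩ := ih t.2.2 (collectA nodes d t.2.1 c).2 hch.2
          refine ⟨2 + k1 + k2, ?_, fun f st => ?_⟩
          · have : (2 : Nat) ^ (d + 1 + 2) = 2 ^ (d + 2) + 2 ^ (d + 2) := by ring
            omega
          · -- pop (id,false): push children and the marked node
            have step1 :
                runB nodes ((2 + k1 + k2) + f) ((id, false) :: st) c =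
                runB nodes (k1 + (k2 + (1 + f)))
                  ((t.2.1, false) :: (t.2.2, false) :: (id, true) :: st) c := by
              have : (2 + k1 + k2) + f = (k1 + (k2 + (1 + f))) + 1 := by omega
              rw [this]
              simp [runB, h0, hid, hf]
            rw [step1, e1, e2]
            -- pop (id,true): both children are now cached with A's sets
            have gl :
                ((collectA nodes d t.2.2 (collectA nodes d t.2.1 c).2).2).get? t.2.1 =
                  some (collectA nodes d t.2.1 c).1 :=
              collectA_pres nodes d t.2.2 _ _ _ (collectA_caches nodes d t.2.1 c hch.1)
            have gr :
                ((collectA nodes d t.2.2 (collectA nodes d t.2.1 c).2).2).get? t.2.2 =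
                  some (collectA nodes d t.2.2 (collectA nodes d t.2.1 c).2).1 :=
              collectA_caches nodes d t.2.2 _ hch.2
            have hfin :
                collectA nodes (d + 1) id c =
                  (PySem.Set.union (collectA nodes d t.2.1 c).1
                      (collectA nodes d t.2.2 (collectA nodes d t.2.1 c).2).1,
                   ((collectA nodes d t.2.2 (collectA nodes d t.2.1 c).2).2).insert id
                     (PySem.Set.union (collectA nodes d t.2.1 c).1
                       (collectA nodes d t.2.2 (collectA nodes d t.2.1 c).2).1)) := by
              simp [collectA, h0, hid, hf]
            rw [hfin]
            have : (1 : Nat) + f = f + 1 := by omega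
            rw [this]
            simp [runB, hf, PySem.Dict.getD_of_get?_eq_some _ _ gl,
              PySem.Dict.getD_of_get?_eq_some _ _ gr]
    · -- cache hit: one pop, skip
      refine ⟨1, by omega, fun f st => ?_⟩
      have h1f : (1 : Nat) + f = f + 1 := by omega
      rw [h1f]
      simp [runB, collectA, h0]

-- one root processed identically by both ports
lemma root_eq (nodes : List (Int × Int × Int)) (id : Int) (c : PySem.Dict Int (List Int))
    (h : depthOk nodes (nodes.length + 1) id = true) :
    runB nodes (2 ^ (nodes.length + 3)) [(id, false)] c =
      (collectA nodes (nodes.length + 1) id c).2 := by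
  obtain ⟨k, hk, e⟩ := simB nodes (nodes.length + 1) id c h
  have hp : (2 : Nat) ^ (nodes.length + 1 + 2) = 2 ^ (nodes.length + 3) := by ring
  have hfuel : 2 ^ (nodes.length + 3) = k + (2 ^ (nodes.length + 3) - k) := by omega
  rw [hfuel, e (2 ^ (nodes.length + 3) - k) []]
  simp [runB]

lemma fold_eq (nodes : List (Int × Int × Int)) :
    ∀ (rest : List (Int × Int × Int)) (c : PySem.Dict Int (List Int)),
      (∀ t ∈ rest, depthOk nodes (nodes.length + 1) t.1 = true) →
      rest.foldl (fun cache t => (collectA nodes (nodes.length + 1) t.1 cache).2) c =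
        rest.foldl (fun cache t => runB nodes (2 ^ (nodes.length + 3)) [(t.1, false)] cache) c := by
  intro rest
  induction rest with
  | nil => intros; rfl
  | cons t rest ih =>
    intro c hall
    simp only [List.foldl_cons]
    rw [root_eq nodes t.1 c (hall t (List.mem_cons_self ..))]
    exact ih _ (fun u hu => hall u (List.mem_cons_of_mem _ hu))

-- ===== VERDICT (by name: the statement is the Claim_ definition above) =====
theorem build_byte_cache_spec : Claim_equal_build_byte_cache := by
  intro nodes _ hpre
  unfold Spec_build_byte_cache build_byte_cache build_byte_cache_alt
  rw [fold_eq nodes nodes PySem.Dict.empty hpre]
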